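-- pv_equiv track=rewrite | github.com/KosinskiLab/AlphaPulldown | alphapulldown/run_multimer_jobs.py | create_pulldown_info
-- ===== SOURCE A (Python) =====
-- import itertools
--
-- def create_pulldown_info(
--         bait_proteins: list, candidate_proteins: list, job_index=None
-- ) -> dict:
--     """
--     A function to create apms info
--
--     Args:
--     all_proteins: list of all proteins in the fasta file parsed by read_all_proteins()
--     bait_protein: name of the bait protein
--     job_index: whether there is a job_index specified or not
--     """
--     all_protein_pairs = list(itertools.product(*[bait_proteins, *candidate_proteins]))
--     num_cols = len(candidate_proteins) + 1
--     data = dict()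
--
--
--     if job_index is None:
--         for i in range(num_cols):
--             curr_col = []
--             for pair in all_protein_pairs:
--                 curr_col.append(pair[i])
--             update_dict = {f"col_{i + 1}": curr_col}
--             data.update(update_dict)
--
--
--     elif isinstance(job_index, int):
--         target_pair = all_protein_pairs[job_index - 1]
--         for i in range(num_cols):
--             update_dict = {f"col_{i + 1}": [target_pair[i]]}
--             data.update(update_dict)
--     return data
-- ===== SOURCE B (Python) =====
-- def create_pulldown_info(bait_proteins, candidate_proteins, job_index=None):
--     """Build each column directly from block structure / mixed-radix index
--     decomposition instead of materialising the full cartesian product."""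
--     lists = [bait_proteins, *candidate_proteins]
--     sizes = [len(l) for l in lists]
--     cols = []
--     if job_index is None:
--         outer = 1
--         for i, lst in enumerate(lists):
--             inner = 1
--             for s in sizes[i + 1:]:
--                 inner *= s
--             cols.append((f"col_{i + 1}",
--                          [x for x in lst for _ in range(inner)] * outer))
--             outer *= sizes[i]
--     elif isinstance(job_index, int):
--         total = 1
--         for s in sizes:
--             total *= s
--         j = job_index - 1
--         if j < 0:
--             j += total
--         for i, lst in enumerate(lists):
--             inner = 1
--             for s in sizes[i + 1:]:
--                 inner *= s
--             cols.append((f"col_{i + 1}", [lst[(j // inner) % sizes[i]]]))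
--     return dict(cols)
-- ===== Notes on version B (the rewrite author's own statement) =====
-- stated objective: alternative
-- what changed: B never materialises the itertools.product of all input lists: each column is built directly from its block structure (each element repeated by the product of later list sizes, the pattern tiled by the product of earlier sizes), and for an integer job_index the single target row is recovered by mixed-radix decomposition of the index instead of indexing into the full product (intended as faster on the indexed case; a timing run saw A time out at n=1024 where B returned, but could not confirm a ratio).
import Mathlib
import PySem

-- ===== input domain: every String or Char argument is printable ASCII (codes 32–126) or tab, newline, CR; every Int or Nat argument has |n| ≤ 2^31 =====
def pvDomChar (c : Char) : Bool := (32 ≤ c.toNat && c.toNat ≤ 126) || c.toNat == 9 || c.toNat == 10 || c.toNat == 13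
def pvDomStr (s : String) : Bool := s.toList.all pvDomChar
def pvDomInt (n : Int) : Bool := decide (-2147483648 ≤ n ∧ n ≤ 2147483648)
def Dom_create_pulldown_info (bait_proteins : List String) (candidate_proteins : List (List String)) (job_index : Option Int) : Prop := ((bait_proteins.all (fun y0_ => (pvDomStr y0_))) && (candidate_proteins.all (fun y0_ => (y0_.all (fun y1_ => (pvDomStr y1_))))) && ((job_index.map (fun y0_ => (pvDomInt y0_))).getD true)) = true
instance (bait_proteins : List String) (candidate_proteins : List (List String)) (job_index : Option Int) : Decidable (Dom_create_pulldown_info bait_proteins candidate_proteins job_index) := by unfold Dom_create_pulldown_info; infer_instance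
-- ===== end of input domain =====

-- B replaces the full cartesian product by direct block-structure / mixed-radix
-- index computation of each column (objective: alternative algorithm).

-- f"col_{i+1}" (shared formatting helper of both ports)
def pvKey (i : Nat) : String := "col_" ++ PySem.Int.toStr ((i : Int) + 1)

-- ===== PORT A =====
-- list(itertools.product(*[bait_proteins, *candidate_proteins])): tuples become
-- List String (homogeneous); rightmost factor varies fastest, as in Python.
def pvProduct : List (List String) → List (List String)
  | [] => [[]]
  | l :: ls => l.flatMap (fun x => (pvProduct ls).map (fun t => x :: t))

def create_pulldown_info (bait_proteins : List String) (candidate_proteins : List (List String)) (job_index : Option Int) : List (String × List String) :=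
  let all_protein_pairs := pvProduct (bait_proteins :: candidate_proteins)
  let num_cols := candidate_proteins.length + 1
  let data : PySem.Dict String (List String) := PySem.Dict.empty
  match job_index with
  | none =>
    -- pair[i]: here i < pair.length always holds, so List.getD is exact
    ((List.range num_cols).foldl (fun d i =>
        let curr_col := all_protein_pairs.foldl (fun acc pair => acc ++ [pair.getD i ""]) []
        d.insert (pvKey i) curr_col) data).items
  | some j =>
    match PySem.List.pyGet? all_protein_pairs (j - 1) with
    | none => []   -- IndexError in Python; excluded by Pre_
    | some target_pair =>
      ((List.range num_cols).foldl (fun d i =>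
          d.insert (pvKey i) [target_pair.getD i ""]) data).items

-- ===== PORT B =====
-- job_index is None: column i = (each x of lists[i] repeated inner times) tiled outer times
def pvAltColsNone : List (List String) → Nat → Nat → List (String × List String)
  | [], _, _ => []
  | l :: ls, i, outer =>
    let inner := (ls.map List.length).prod
    (pvKey i, (List.replicate outer (l.flatMap (fun x => List.replicate inner x))).flatten)
      :: pvAltColsNone ls (i + 1) (outer * l.length)

-- job_index is an int: digit of column i is (j // inner) % sizes[i].
-- lst[k] with 0 ≤ k < len under Pre_, so pyGet?/getD is exact there.
def pvAltColsIdx : List (List String) → Nat → Int → List (String × List String)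
  | [], _, _ => []
  | l :: ls, i, j =>
    let inner : Int := ((ls.map List.length).prod : Nat)
    (pvKey i,
      [(PySem.List.pyGet? l (PySem.Int.mod (PySem.Int.floordiv j inner) (l.length : Int))).getD ""])
      :: pvAltColsIdx ls (i + 1) j

-- cols is built as a list of (key, column) pairs; dict(cols) keeps it as is
-- (all keys "col_1" … "col_n" are distinct), so the port returns the list.
def create_pulldown_info_alt (bait_proteins : List String) (candidate_proteins : List (List String)) (job_index : Option Int) : List (String × List String) :=
  let lists := bait_proteins :: candidate_proteins
  match job_index with
  | none => pvAltColsNone lists 0 1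
  | some j0 =>
    let total : Int := ((lists.map List.length).prod : Nat)
    let j := if j0 - 1 < 0 then j0 - 1 + total else j0 - 1
    pvAltColsIdx lists 0 j

-- ===== PRECONDITION & SPEC =====
-- Pre_ excludes exactly the inputs where A raises IndexError: an integer
-- job_index that is not a valid Python index into the cartesian product
-- (in particular any integer job_index when some input list is empty).
def Pre_create_pulldown_info (bait_proteins : List String) (candidate_proteins : List (List String)) (job_index : Option Int) : Prop :=
  ∀ j : Int, job_index = some j →
    0 < ((bait_proteins :: candidate_proteins).map List.length).prod ∧
    -((((bait_proteins :: candidate_proteins).map List.length).prod : Nat) : Int) ≤ j - 1 ∧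
    j - 1 < ((((bait_proteins :: candidate_proteins).map List.length).prod : Nat) : Int)
instance (bait_proteins : List String) (candidate_proteins : List (List String)) (job_index : Option Int) : Decidable (Pre_create_pulldown_info bait_proteins candidate_proteins job_index) := by unfold Pre_create_pulldown_info; infer_instance

def pvWitness_create_pulldown_info : List String × List (List String) × Option Int := (["b1", "b2"], [["x", "y"], ["z"]], some 3)

def Spec_create_pulldown_info (bait_proteins : List String) (candidate_proteins : List (List String)) (job_index : Option Int) (out : List (String × List String)) : Prop := out = create_pulldown_info_alt bait_proteins candidate_proteins job_index
instance (bait_proteins : List String) (candidate_proteins : List (List String)) (job_index : Option Int) (out : List (String × List String)) : Decidable (Spec_create_pulldown_info bait_proteins candidate_proteins job_index out) := by unfold Spec_create_pulldown_info; infer_instance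

-- ===== CLAIM (what is proved, stated in full; the proofs are below) =====
def Claim_equal_create_pulldown_info : Prop := ∀ (bait_proteins : List String) (candidate_proteins : List (List String)) (job_index : Option Int), Dom_create_pulldown_info bait_proteins candidate_proteins job_index → Pre_create_pulldown_info bait_proteins candidate_proteins job_index → Spec_create_pulldown_info bait_proteins candidate_proteins job_index (create_pulldown_info bait_proteins candidate_proteins job_index)

-- ===== LEMMAS AND PROOFS =====

def pvNatChars (n : Nat) : List Char :=
  if _h : n < 10 then [Nat.digitChar n]
  else pvNatChars (n / 10) ++ [Nat.digitChar (n % 10)]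
  decreasing_by exact Nat.div_lt_self (by omega) (by omega)

theorem pvToDigitsCore_eq : ∀ (f : Nat), ∀ (n : Nat) (acc : List Char), n < 10 ^ (f + 1) →
    Nat.toDigitsCore 10 (f + 1) n acc = pvNatChars n ++ acc := by
  intro f
  induction f with
  | zero =>
    intro n acc h
    simp only [Nat.zero_add, pow_one] at h
    rw [Nat.toDigitsCore]
    have : n / 10 = 0 := Nat.div_eq_of_lt h
    simp only [this, if_true]
    rw [pvNatChars, dif_pos h, Nat.mod_eq_of_lt h]
    rfl
  | succ f ih =>
    intro n acc h
    rw [Nat.toDigitsCore]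
    by_cases h10 : n < 10
    · have : n / 10 = 0 := Nat.div_eq_of_lt h10
      simp only [this, if_true]
      rw [pvNatChars, dif_pos h10, Nat.mod_eq_of_lt h10]
      rfl
    · have hd : n / 10 ≠ 0 := by omega
      simp only [hd, if_false]
      rw [ih (n / 10) _ (by
        rw [Nat.div_lt_iff_lt_mul (by omega : 0 < 10)]
        calc n < 10 ^ (f + 1 + 1) := h
        _ ≤ 10 ^ (f + 1) * 10 := by rw [pow_succ])]
      conv_rhs => rw [pvNatChars, dif_neg h10]
      rw [List.append_assoc]
      rfl

theorem pvToDigits_eq (n : Nat) : Nat.toDigits 10 n = pvNatChars n := by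
  rw [Nat.toDigits, pvToDigitsCore_eq n n [] (by
    calc n < 10 ^ n := Nat.lt_pow_self (by omega)
    _ ≤ 10 ^ (n + 1) := Nat.pow_le_pow_right (by omega) (by omega)), List.append_nil]

theorem pvDigitChar_inj {m n : Nat} (hm : m < 10) (hn : n < 10)
    (h : Nat.digitChar m = Nat.digitChar n) : m = n := by
  interval_cases m <;> interval_cases n <;> simp_all [Nat.digitChar]

theorem pvNatChars_ne_nil (n : Nat) : pvNatChars n ≠ [] := by
  rw [pvNatChars]; split <;> simp

theorem pvNatChars_inj : ∀ {m n : Nat}, pvNatChars m = pvNatChars n → m = n := by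
  intro m
  induction m using Nat.strong_induction_on with
  | _ m ih =>
    intro n h
    by_cases hm : m < 10 <;> by_cases hn : n < 10
    · rw [pvNatChars, dif_pos hm] at h
      conv_rhs at h => rw [pvNatChars, dif_pos hn]
      exact pvDigitChar_inj hm hn (by simpa using h)
    · rw [pvNatChars, dif_pos hm] at h
      conv_rhs at h => rw [pvNatChars, dif_neg hn]
      have hl := congrArg List.length h
      simp only [List.length_append, List.length_cons, List.length_nil] at hl
      have hp := List.length_pos_iff.mpr (pvNatChars_ne_nil (n / 10))
      omega
    · rw [pvNatChars, dif_neg hm] at h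
      conv_rhs at h => rw [pvNatChars, dif_pos hn]
      have hl := congrArg List.length h
      simp only [List.length_append, List.length_cons, List.length_nil] at hl
      have hp := List.length_pos_iff.mpr (pvNatChars_ne_nil (m / 10))
      omega
    · rw [pvNatChars, dif_neg hm] at h
      conv_rhs at h => rw [pvNatChars, dif_neg hn]
      obtain ⟨h1, h2⟩ := List.append_inj' h (by simp)
      have e1 : m / 10 = n / 10 := ih _ (Nat.div_lt_self (by omega) (by omega)) h1
      have e2 : m % 10 = n % 10 :=
        pvDigitChar_inj (Nat.mod_lt _ (by omega)) (Nat.mod_lt _ (by omega)) (by simpa using h2)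
      omega

theorem pvKey_inj {i j : Nat} (h : pvKey i = pvKey j) : i = j := by
  unfold pvKey at h
  have h2 := congrArg String.toList h
  rw [String.toList_append, String.toList_append, PySem.Int.toList_toStr,
    PySem.Int.toList_toStr] at h2
  have h3 := List.append_cancel_left h2
  unfold PySem.Int.toChars at h3
  rw [if_neg (by omega), if_neg (by omega)] at h3
  have h4 : ((i : Int) + 1).toNat = i + 1 := by omega
  have h5 : ((j : Int) + 1).toNat = j + 1 := by omega
  rw [h4, h5, pvToDigits_eq, pvToDigits_eq] at h3
  have := pvNatChars_inj h3
  omega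

theorem pv_dict_fold (g : Nat → List String) (n : Nat) :
    ((List.range n).foldl (fun d i => d.insert (pvKey i) (g i)) PySem.Dict.empty).items
      = (List.range n).map (fun i => (pvKey i, g i)) := by
  induction n with
  | zero => rfl
  | succ n ih =>
    rw [List.range_succ, List.foldl_append, List.foldl_cons, List.foldl_nil,
      List.map_append]
    set d := (List.range n).foldl (fun d i => d.insert (pvKey i) (g i)) PySem.Dict.empty with hd
    have hc : d.contains (pvKey n) = false := by
      show d.items.any (fun p => p.1 == pvKey n) = false
      rw [ih]
      simp only [List.any_eq_false, List.mem_map, List.mem_range]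
      rintro p ⟨i, hi, rfl⟩
      intro he
      have := pvKey_inj (by simpa using he)
      omega
    show (d.insert (pvKey n) (g n)).items = _
    rw [PySem.Dict.insert, if_neg (by simp [hc]), ih]
    simp

def pvT (ls : List (List String)) : Nat := (ls.map List.length).prod

theorem pvProduct_length (ls : List (List String)) : (pvProduct ls).length = pvT ls := by
  induction ls with
  | nil => rfl
  | cons l ls ih =>
    simp [pvProduct, pvT, List.length_flatMap, ih]

theorem pv_col_zero (l : List String) (ls : List (List String)) :
    (pvProduct (l :: ls)).map (fun p => p.getD 0 "")
      = l.flatMap (fun x => List.replicate (pvT ls) x) := by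
  simp only [pvProduct, List.map_flatMap, List.map_map]
  refine List.flatMap_congr (fun x _ => ?_)
  have hc : ((fun (p : List String) => p.getD 0 "") ∘ fun t => x :: t) = fun _ => x :=
    funext fun t => rfl
  rw [hc, List.map_const', pvProduct_length]

theorem pv_col_succ (l : List String) (ls : List (List String)) (i : Nat) :
    (pvProduct (l :: ls)).map (fun p => p.getD (i + 1) "")
      = (List.replicate l.length ((pvProduct ls).map (fun t => t.getD i ""))).flatten := by
  simp only [pvProduct, List.map_flatMap, List.map_map]
  have : ∀ x : String, ((pvProduct ls).map ((fun p => p.getD (i + 1) "") ∘ (fun t => x :: t)))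
      = (pvProduct ls).map (fun t => t.getD i "") := by
    intro x
    apply List.map_congr_left
    intro t _
    simp [Function.comp]
  induction l with
  | nil => rfl
  | cons x l ihl =>
    simp only [List.flatMap_cons, this] at ihl ⊢
    rw [ihl, List.length_cons, List.replicate_succ, List.flatten_cons]

theorem pv_flatten_rep {α : Type} (a b : Nat) (X : List α) :
    (List.replicate a (List.replicate b X).flatten).flatten
      = (List.replicate (a * b) X).flatten := by
  induction a with
  | zero => simp
  | succ a ih =>
    rw [List.replicate_succ, List.flatten_cons, ih, Nat.succ_mul, Nat.add_comm,
      List.replicate_add, List.flatten_append]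

theorem pvAltColsNone_eq : ∀ (ls : List (List String)) (i outer : Nat),
    pvAltColsNone ls i outer
      = (List.range ls.length).map (fun k =>
          (pvKey (i + k),
           (List.replicate outer ((pvProduct ls).map (fun p => p.getD k ""))).flatten)) := by
  intro ls
  induction ls with
  | nil => intro i outer; rfl
  | cons l ls ih =>
    intro i outer
    rw [pvAltColsNone, List.length_cons, List.range_succ_eq_map, List.map_cons, List.map_map]
    congr 1
    · simp only [Nat.add_zero]
      rw [pv_col_zero]
      rfl
    · rw [ih (i + 1) (outer * l.length)]
      apply List.map_congr_left
      intro k _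
      simp only [Function.comp]
      congr 1
      · congr 1
        omega
      · rw [pv_col_succ, pv_flatten_rep]

def pvPick : List (List String) → Nat → List String
  | [], _ => []
  | l :: ls, n => l.getD (n / pvT ls) "" :: pvPick ls (n % pvT ls)

theorem pvProduct_get : ∀ (ls : List (List String)) (n : Nat), n < pvT ls →
    (pvProduct ls)[n]? = some (pvPick ls n) := by
  intro ls
  induction ls with
  | nil =>
    intro n hn
    simp [pvT] at hn
    subst hn
    rfl
  | cons l ls ih =>
    intro n
    induction l generalizing n with
    | nil => intro hn; simp [pvT] at hn
    | cons x l ihl =>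
      intro hn
      have hT : 0 < pvT ls := by
        rcases Nat.eq_zero_or_pos (pvT ls) with h0 | h0
        · have he : pvT ((x :: l) :: ls) = (l.length + 1) * pvT ls := by
            simp [pvT]
          rw [he, h0] at hn
          omega
        · exact h0
      rw [show pvProduct ((x :: l) :: ls) = ((pvProduct ls).map (fun t => x :: t)) ++ pvProduct (l :: ls) from by
        simp [pvProduct, List.flatMap_cons]]
      by_cases hlt : n < pvT ls
      · rw [List.getElem?_append_left (by rw [List.length_map, pvProduct_length]; exact hlt)]
        rw [List.getElem?_map, ih n hlt]
        rw [pvPick, Nat.div_eq_of_lt hlt, Nat.mod_eq_of_lt hlt]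
        rfl
      · rw [Nat.not_lt] at hlt
        rw [List.getElem?_append_right (by rw [List.length_map, pvProduct_length]; exact hlt)]
        rw [List.length_map, pvProduct_length]
        have hn' : n - pvT ls < pvT (l :: ls) := by
          have h1 : pvT ((x :: l) :: ls) = pvT ls + l.length * pvT ls := by
            simp [pvT]; ring
          have h2 : pvT (l :: ls) = l.length * pvT ls := by simp [pvT]
          omega
        rw [ihl (n - pvT ls) hn']
        rw [pvPick, pvPick]
        have hdiv : n / pvT ls = (n - pvT ls) / pvT ls + 1 := by
          rw [Nat.div_eq_sub_div hT hlt]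
        have hmod : n % pvT ls = (n - pvT ls) % pvT ls := Nat.mod_eq_sub_mod hlt
        rw [hdiv, hmod, List.getD_cons_succ]

theorem pvAltColsIdx_eq : ∀ (ls : List (List String)) (i n c : Nat), n < pvT ls →
    pvAltColsIdx ls i ((n : Int) + (c : Int) * (pvT ls : Int))
      = (List.range ls.length).map (fun k => (pvKey (i + k), [(pvPick ls n).getD k ""])) := by
  intro ls
  induction ls with
  | nil => intro i n c _; rfl
  | cons l ls ih =>
    intro i n c hn
    have hLT : n < l.length * pvT ls := by
      have : pvT (l :: ls) = l.length * pvT ls := by simp [pvT]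
      omega
    have hT : 0 < pvT ls := by
      rcases Nat.eq_zero_or_pos (pvT ls) with h0 | h0
      · rw [h0, Nat.mul_zero] at hLT; omega
      · exact h0
    have hm : ((n : Int) + (c : Int) * (pvT (l :: ls) : Int))
        = ((n + c * (l.length * pvT ls) : Nat) : Int) := by
      have : pvT (l :: ls) = l.length * pvT ls := by simp [pvT]
      rw [this]; push_cast; ring
    set m := n + c * (l.length * pvT ls) with hmdef
    rw [pvAltColsIdx, hm]
    have hinner : (((ls.map List.length).prod : Nat) : Int) = ((pvT ls : Nat) : Int) := by
      simp [pvT]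
    rw [hinner, PySem.Int.floordiv_natCast, PySem.Int.mod_natCast]
    have hdiv : m / pvT ls = n / pvT ls + c * l.length := by
      rw [hmdef, show c * (l.length * pvT ls) = c * l.length * pvT ls from by ring,
        Nat.add_mul_div_right _ _ hT]
    have hdivlt : n / pvT ls < l.length := (Nat.div_lt_iff_lt_mul hT).mpr (by omega)
    have hmod : (m / pvT ls) % l.length = n / pvT ls := by
      rw [hdiv, Nat.add_mul_mod_self_right, Nat.mod_eq_of_lt hdivlt]
    rw [hmod, PySem.List.pyGet?_natCast]
    have htail : ((m : Nat) : Int) = (((n % pvT ls : Nat)) : Int)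
        + ((n / pvT ls + c * l.length : Nat) : Int) * ((pvT ls : Nat) : Int) := by
      push_cast
      have := Nat.div_add_mod n (pvT ls)
      push_cast at this
      nlinarith [this]
    rw [htail, ih (i + 1) (n % pvT ls) (n / pvT ls + c * l.length) (Nat.mod_lt _ hT)]
    rw [List.length_cons, List.range_succ_eq_map, List.map_cons, List.map_map]
    have hhead : (pvKey i, [(l[n / pvT ls]?).getD ""])
        = (pvKey (i + 0), [(pvPick (l :: ls) n).getD 0 ""]) := by
      simp only [Nat.add_zero, pvPick]
      rw [List.getD_cons_zero, ← List.getD_eq_getElem?_getD]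
    have htail2 : (List.range ls.length).map
          (fun k => (pvKey (i + 1 + k), [(pvPick ls (n % pvT ls)).getD k ""]))
        = (List.range ls.length).map
          ((fun k => (pvKey (i + k), [(pvPick (l :: ls) n).getD k ""])) ∘ Nat.succ) := by
      apply List.map_congr_left
      intro k _
      simp only [Function.comp, pvPick]
      congr 2
      omega
    rw [hhead, htail2]

-- ===== VERDICT (by name: the statement is the Claim_ definition above) =====
theorem create_pulldown_info_spec : Claim_equal_create_pulldown_info := by
  intro bait cands ji hdom hpre
  unfold Spec_create_pulldown_info
  cases ji with
  | none =>
    unfold create_pulldown_info create_pulldown_info_alt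
    simp only []
    rw [pv_dict_fold (fun i => (pvProduct (bait :: cands)).foldl
      (fun acc pair => acc ++ [pair.getD i ""]) [])]
    rw [pvAltColsNone_eq]
    have hn : cands.length + 1 = (bait :: cands).length := rfl
    rw [hn]
    apply List.map_congr_left
    intro k _
    rw [PySem.List.foldl_append_singleton_eq_map, List.nil_append]
    simp [List.flatten]
  | some j0 =>
    obtain ⟨hTpos, hlo, hhi⟩ := hpre j0 rfl
    unfold create_pulldown_info create_pulldown_info_alt
    simp only []
    set lists := bait :: cands with hlists
    have hTeq : ((lists.map List.length).prod) = pvT lists := rfl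
    set T := pvT lists with hTdef
    -- the normalized (nonnegative) Python index
    set n : Nat := (if j0 - 1 < 0 then j0 - 1 + (T : Int) else j0 - 1).toNat with hndef
    have hnlt : n < T := by
      rw [hndef]
      split <;> omega
    have hj : (if j0 - 1 < 0 then j0 - 1 + (T : Int) else j0 - 1) = (n : Int) := by
      rw [hndef]
      split <;> omega
    have hget : PySem.List.pyGet? (pvProduct lists) (j0 - 1) = some (pvPick lists n) := by
      by_cases hneg : j0 - 1 < 0
      · have hk : j0 - 1 = -(((1 - j0).toNat : Nat) : Int) := by omega
        rw [hk, PySem.List.pyGet?_neg_natCast (pvProduct lists) ((1 - j0).toNat) (by omega) (by rw [pvProduct_length]; omega)]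
        rw [pvProduct_length]
        have : pvT lists - (1 - j0).toNat = n := by
          rw [hndef]
          rw [if_pos hneg]
          omega
        rw [this]
        exact pvProduct_get lists n hnlt
      · rw [PySem.List.pyGet?_of_nonneg (pvProduct lists) (by omega)]
        have : (j0 - 1).toNat = n := by
          rw [hndef, if_neg hneg]
        rw [this]
        exact pvProduct_get lists n hnlt
    rw [hTeq, hget, hj]
    simp only []
    rw [pv_dict_fold (fun i => [(pvPick lists n).getD i ""])]
    have hcast : (n : Int) = (n : Int) + ((0 : Nat) : Int) * ((pvT lists : Nat) : Int) := by
      push_cast; ring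
    rw [hcast, pvAltColsIdx_eq lists 0 n 0 hnlt]
    have hn2 : cands.length + 1 = lists.length := rfl
    rw [hn2]
    apply List.map_congr_left
    intro k _
    simp
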